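-- pv_equiv track=rewrite | github.com/mskozlova/advent_of_code | 2023/day14/day14_pt2.py | move_column_north
-- ===== SOURCE A (Python) =====
-- def move_column_north(map, column_num):
--     new_column = []
--     total_rows = len(map)
--     last_occupied_row = -1
--     load = 0
--
--     for row in range(total_rows):
--         symbol = map[row][column_num]
--
--         if symbol == ".":
--             pass
--         elif symbol == "O":
--             last_occupied_row += 1
--             load += total_rows - last_occupied_row
--             new_column.append("O")
--         else:  # symbol == "#"
--             while len(new_column) < row:
--                 new_column.append(".")
--
--             new_column.append("#")
--             last_occupied_row = row
--
--     while len(new_column) < total_rows: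
--         new_column.append(".")
--
--     for row_num in range(total_rows):
--         map[row_num][column_num] = new_column[row_num]
--
--     return load
-- ===== SOURCE B (Python) =====
-- def move_column_north(map, column_num):
--     total_rows = len(map)
--     col = [row[column_num] for row in map]
--     walls = [i for i, s in enumerate(col) if s != "." and s != "O"]
--     bounds = [-1] + walls + [total_rows]
--     new_column = ["."] * total_rows
--     for w in walls:
--         new_column[w] = "#"
--     load = 0
--     for lo, hi in zip(bounds, bounds[1:]):
--         c = col[lo + 1:hi].count("O")
--         new_column[lo + 1:lo + 1 + c] = ["O"] * c
--         load += sum(total_rows - i for i in range(lo + 1, lo + 1 + c))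
--     for row_num in range(total_rows):
--         map[row_num][column_num] = new_column[row_num]
--     return load
-- ===== Notes on version B (the rewrite author's own statement) =====
-- stated objective: alternative
-- what changed: B replaces A's single pass with a running last_occupied_row pointer by a group-per-segment pass: it reads the column, finds the wall indices, and for each open segment between consecutive walls counts its 'O's and sums their destination loads directly, rebuilding the column segment-wise.
import Mathlib
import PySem

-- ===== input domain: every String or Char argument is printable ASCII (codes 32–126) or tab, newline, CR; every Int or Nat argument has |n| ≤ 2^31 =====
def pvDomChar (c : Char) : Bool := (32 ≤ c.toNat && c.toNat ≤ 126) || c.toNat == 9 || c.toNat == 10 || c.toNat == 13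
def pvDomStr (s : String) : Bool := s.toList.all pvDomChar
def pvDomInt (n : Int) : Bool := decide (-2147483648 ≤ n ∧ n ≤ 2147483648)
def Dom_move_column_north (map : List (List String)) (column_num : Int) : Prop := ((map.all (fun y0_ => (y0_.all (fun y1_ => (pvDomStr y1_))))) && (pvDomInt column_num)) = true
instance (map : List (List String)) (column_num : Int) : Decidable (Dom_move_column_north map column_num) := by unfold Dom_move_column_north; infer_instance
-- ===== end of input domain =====

-- B rebuilds the column per wall-delimited segment (count the 'O's, place them at the top of the
-- segment) instead of A's running last_occupied_row pointer; same cost, different decomposition.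
-- Both Pythons mutate `map` in place identically; the Lean ports are about the RETURN value (the load).

-- ===== PORT A =====
-- A's loop body, lambda-lifted; state = (new_column, last_occupied_row, load)
def stepA (map : List (List String)) (column_num n : Int)
    (st : List String × Int × Int) (row : Int) : List String × Int × Int :=
  let symbol := PySem.List.pyGetD (PySem.List.pyGetD map row []) column_num ""
  if symbol = "." then st
  else if symbol = "O" then (st.1 ++ ["O"], st.2.1 + 1, st.2.2 + (n - (st.2.1 + 1)))
  else ((st.1 ++ List.replicate (row - (st.1.length : Int)).toNat ".") ++ ["#"], row, st.2.2)

def move_column_north (map : List (List String)) (column_num : Int) : Int :=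
  let total_rows : Int := map.length
  -- the trailing '.'-padding loop and the write-back into `map` only mutate the caller's
  -- list and never touch `load`; they have no counterpart in the returned value
  ((PySem.List.pyRange 0 total_rows 1).foldl (stepA map column_num total_rows) ([], -1, 0)).2.2

-- ===== PORT B =====
-- B's segment body, lambda-lifted; p = (lo, hi), the open segment is col[lo+1:hi]
def stepB (col : List String) (n : Int) (load : Int) (p : Int × Int) : Int :=
  let c : Int := ((PySem.List.slice col (some (p.1 + 1)) (some p.2)).count "O" : Nat)
  load + (PySem.List.pyRange (p.1 + 1) (p.1 + 1 + c) 1).foldl (fun a i => a + (n - i)) 0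

def move_column_north_alt (map : List (List String)) (column_num : Int) : Int :=
  let total_rows : Int := map.length
  let col : List String := map.map (fun row => PySem.List.pyGetD row column_num "")
  let walls : List Int :=
    ((PySem.List.enumerate col 0).filter (fun p => !(p.2 == ".") && !(p.2 == "O"))).map (fun p => p.1)
  let bounds : List Int := -1 :: (walls ++ [total_rows])
  -- new_column is only written back into the caller's `map`; it never affects the returned load
  (bounds.zip (PySem.List.slice bounds (some 1) none)).foldl (stepB col total_rows) 0

-- ===== PRECONDITION & SPEC =====
-- Pre_ excludes exactly the inputs where Python A raises IndexError: a row for which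
-- map[row][column_num] is out of range.
def Pre_move_column_north (map : List (List String)) (column_num : Int) : Prop :=
  ∀ r ∈ map, PySem.Raise.InRange r.length column_num
instance (map : List (List String)) (column_num : Int) : Decidable (Pre_move_column_north map column_num) := by unfold Pre_move_column_north; infer_instance

def pvWitness_move_column_north : List (List String) × Int :=
  ([["O", "."], [".", "#"], ["O", "O"]], 0)

def Spec_move_column_north (map : List (List String)) (column_num : Int) (out : Int) : Prop := out = move_column_north_alt map column_num
instance (map : List (List String)) (column_num : Int) (out : Int) : Decidable (Spec_move_column_north map column_num out) := by unfold Spec_move_column_north; infer_instance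

-- ===== CLAIM (what is proved, stated in full; the proofs are below) =====
def Claim_equal_move_column_north : Prop := ∀ (map : List (List String)) (column_num : Int), Dom_move_column_north map column_num → Pre_move_column_north map column_num → Spec_move_column_north map column_num (move_column_north map column_num)

-- ===== LEMMAS AND PROOFS =====

-- the load of a column suffix starting at absolute row i, given the running pointer `last`
def loadA (n : Int) : List String → Int → Int → Int
  | [], _, _ => 0
  | s :: t, i, last =>
    if s = "." then loadA n t (i + 1) last
    else if s = "O" then (n - (last + 1)) + loadA n t (i + 1) (last + 1)
    else loadA n t (i + 1) i

theorem loadA_dot (n : Int) (t : List String) (i last : Int) :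
    loadA n ("." :: t) i last = loadA n t (i + 1) last := by simp [loadA]

theorem loadA_O (n : Int) (t : List String) (i last : Int) :
    loadA n ("O" :: t) i last = (n - (last + 1)) + loadA n t (i + 1) (last + 1) := by
  simp [loadA]

theorem loadA_wall (n : Int) (s : String) (t : List String) (i last : Int)
    (h1 : s ≠ ".") (h2 : s ≠ "O") : loadA n (s :: t) i last = loadA n t (i + 1) i := by
  simp [loadA, h1, h2]

-- A's step expressed on (index, symbol) pairs
def stepE (n : Int) (st : List String × Int × Int) (p : Int × String) : List String × Int × Int :=
  if p.2 = "." then st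
  else if p.2 = "O" then (st.1 ++ ["O"], st.2.1 + 1, st.2.2 + (n - (st.2.1 + 1)))
  else ((st.1 ++ List.replicate (p.1 - (st.1.length : Int)).toNat ".") ++ ["#"], p.1, st.2.2)

-- the absolute indices of the wall cells of a suffix starting at absolute row i
def wallsOf : List String → Int → List Int
  | [], _ => []
  | s :: t, i => if s = "." ∨ s = "O" then wallsOf t (i + 1) else i :: wallsOf t (i + 1)

theorem foldE_eq (n : Int) : ∀ (col : List String) (i : Int) (nc : List String) (last load : Int),
    ((PySem.List.enumerate col i).foldl (stepE n) (nc, last, load)).2.2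
      = load + loadA n col i last := by
  intro col
  induction col with
  | nil => intro i nc last load; simp [PySem.List.enumerate_nil, loadA]
  | cons s t ih =>
    intro i nc last load
    rw [PySem.List.enumerate_cons, List.foldl_cons]
    by_cases h1 : s = "."
    · subst h1
      rw [loadA_dot]
      have hst : stepE n (nc, last, load) (i, ".") = (nc, last, load) := by simp [stepE]
      rw [hst, ih]
    · by_cases h2 : s = "O"
      · subst h2
        rw [loadA_O]
        have hst : stepE n (nc, last, load) (i, "O")
            = (nc ++ ["O"], last + 1, load + (n - (last + 1))) := by simp [stepE]
        rw [hst, ih]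
        omega
      · rw [loadA_wall n s t i last h1 h2]
        have hst : stepE n (nc, last, load) (i, s)
            = ((nc ++ List.replicate (i - (nc.length : Int)).toNat ".") ++ ["#"], i, load) := by
          simp [stepE, h1, h2]
        rw [hst, ih]

theorem walls_enum : ∀ (col : List String) (i : Int),
    ((PySem.List.enumerate col i).filter (fun p => !(p.2 == ".") && !(p.2 == "O"))).map (fun p => p.1)
      = wallsOf col i := by
  intro col
  induction col with
  | nil => intro i; simp [PySem.List.enumerate_nil, wallsOf]
  | cons s t ih =>
    intro i
    rw [PySem.List.enumerate_cons]
    by_cases h1 : s = "." <;> by_cases h2 : s = "O" <;>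
      simp [wallsOf, h1, h2, ih]

theorem wallsOf_nil_free : ∀ (suf : List String) (i : Int),
    wallsOf suf i = [] → ∀ x ∈ suf, x = "." ∨ x = "O" := by
  intro suf
  induction suf with
  | nil => simp
  | cons s t ih =>
    intro i h x hx
    by_cases hs : s = "." ∨ s = "O"
    · simp only [wallsOf, if_pos hs] at h
      rcases List.mem_cons.1 hx with rfl | hx
      · exact hs
      · exact ih (i + 1) h x hx
    · simp [wallsOf, if_neg hs] at h

theorem wallsOf_cons_decomp : ∀ (suf : List String) (i w : Int) (ws : List Int),
    wallsOf suf i = w :: ws →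
    ∃ seg s rest, suf = seg ++ s :: rest ∧ (∀ x ∈ seg, x = "." ∨ x = "O") ∧
      ¬(s = "." ∨ s = "O") ∧ i + (seg.length : Int) = w ∧ wallsOf rest (w + 1) = ws := by
  intro suf
  induction suf with
  | nil => intro i w ws h; simp [wallsOf] at h
  | cons s t ih =>
    intro i w ws h
    by_cases hs : s = "." ∨ s = "O"
    · simp only [wallsOf, if_pos hs] at h
      obtain ⟨seg, s', rest, hdec, hfree, hwall, hidx, hrest⟩ := ih (i + 1) w ws h
      refine ⟨s :: seg, s', rest, by simp [hdec], ?_, hwall, ?_, hrest⟩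
      · intro x hx
        rcases List.mem_cons.1 hx with rfl | hx
        · exact hs
        · exact hfree x hx
      · simp only [List.length_cons] at hidx ⊢
        push_cast at hidx ⊢
        omega
    · simp only [wallsOf, if_neg hs] at h
      injection h with h1 h2
      subst h1
      exact ⟨[], s, t, rfl, by simp, hs, by simp, h2⟩

-- loadA over a wall-free segment: count the 'O's and sum their destination loads
theorem loadA_seg (n : Int) : ∀ (seg : List String), (∀ x ∈ seg, x = "." ∨ x = "O") →
    ∀ (rest : List String) (i last : Int),
    loadA n (seg ++ rest) i last
      = ((PySem.List.pyRange (last + 1) (last + 1 + (seg.count "O" : Int)) 1).map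
          (fun j => n - j)).sum
        + loadA n rest (i + (seg.length : Int)) (last + (seg.count "O" : Int)) := by
  intro seg
  induction seg with
  | nil =>
    intro _ rest i last
    rw [PySem.List.pyRange_one_eq_nil (by simp : last + 1 + (((List.count "O" ([] : List String)) : Nat) : Int) ≤ last + 1)]
    simp
  | cons s t ih =>
    intro hfree rest i last
    have hfree' : ∀ x ∈ t, x = "." ∨ x = "O" := fun x hx => hfree x (by simp [hx])
    rcases hfree s (by simp) with hs | hs
    · subst hs
      rw [List.cons_append, loadA_dot, ih hfree' rest (i + 1) last]
      have hc : (("." :: t).count "O") = t.count "O" := by simp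
      have hl : i + ((("." :: t).length : Nat) : Int) = i + 1 + ((t.length : Nat) : Int) := by
        push_cast [List.length_cons]; omega
      rw [hc, hl]
    · subst hs
      rw [List.cons_append, loadA_O, ih hfree' rest (i + 1) (last + 1)]
      have hc : ((("O" :: t).count "O" : Nat) : Int) = ((t.count "O" : Nat) : Int) + 1 := by
        simp
      rw [hc]
      have hcons : PySem.List.pyRange (last + 1) (last + 1 + (((t.count "O" : Nat) : Int) + 1)) 1
          = (last + 1) :: PySem.List.pyRange (last + 1 + 1) (last + 1 + (((t.count "O" : Nat) : Int) + 1)) 1 :=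
        PySem.List.pyRange_one_cons (by omega)
      rw [hcons, List.map_cons, List.sum_cons]
      have harg : last + 1 + 1 + ((t.count "O" : Nat) : Int) = last + 1 + (((t.count "O" : Nat) : Int) + 1) := by
        omega
      rw [← harg]
      have hl : i + ((("O" :: t).length : Nat) : Int) = i + 1 + ((t.length : Nat) : Int) := by
        push_cast [List.length_cons]; omega
      rw [hl, show last + (((t.count "O" : Nat) : Int) + 1) = last + 1 + ((t.count "O" : Nat) : Int) from by omega]
      omega

theorem bfold_eq (fc : List String) (n : Int) :
    ∀ (ws : List Int) (pre suf : List String) (load : Int),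
    fc = pre ++ suf → n = (fc.length : Int) → wallsOf suf (pre.length : Int) = ws →
    ((((pre.length : Int) - 1) :: (ws ++ [n])).zip (ws ++ [n])).foldl (stepB fc n) load
      = load + loadA n suf (pre.length : Int) ((pre.length : Int) - 1) := by
  intro ws
  induction ws with
  | nil =>
    intro pre suf load hfc hn hw
    have hfree := wallsOf_nil_free suf (pre.length : Int) hw
    simp only [List.nil_append, List.zip_cons_cons, List.zip_nil_right, List.foldl_cons,
      List.foldl_nil]
    have hseg := loadA_seg n suf hfree [] (pre.length : Int) ((pre.length : Int) - 1)
    simp only [List.append_nil] at hseg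
    have h3 : (pre.length : Int) - 1 + 1 = (pre.length : Int) := by omega
    rw [h3] at hseg
    have hslice : PySem.List.slice fc (some ((pre.length : Nat) : Int)) (some n) = suf := by
      rw [hn, hfc]
      have hlen : (((pre ++ suf).length : Nat) : Int)
          = ((pre.length : Nat) : Int) + ((suf.length : Nat) : Int) := by simp
      rw [hlen, PySem.List.slice_natCast_add]
      simp
    simp only [stepB, h3, hslice, PySem.List.foldl_add, hseg, loadA,
      show (fun j : Int => n - j) = HSub.hSub n from rfl]
    omega
  | cons w ws' ih =>
    intro pre suf load hfc hn hw
    obtain ⟨seg, s, rest, hdec, hfree, hwall, hidx, hrest⟩ :=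
      wallsOf_cons_decomp suf (pre.length : Int) w ws' hw
    simp only [List.cons_append, List.zip_cons_cons, List.foldl_cons]
    have hpre' : (((pre ++ seg ++ [s]).length : Nat) : Int) = w + 1 := by
      simp only [List.length_append, List.length_cons, List.length_nil]
      push_cast
      omega
    have hfc' : fc = (pre ++ seg ++ [s]) ++ rest := by
      simp [hfc, hdec]
    have hrest' : wallsOf rest (((pre ++ seg ++ [s]).length : Nat) : Int) = ws' := by
      rw [hpre']; exact hrest
    have hrec := ih (pre ++ seg ++ [s]) rest (stepB fc n load ((pre.length : Int) - 1, w)) hfc' hn hrest'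
    rw [hpre'] at hrec
    rw [show w + 1 - 1 = w from by omega] at hrec
    rw [hrec]
    have h3 : (pre.length : Int) - 1 + 1 = (pre.length : Int) := by omega
    have hslice : PySem.List.slice fc (some ((pre.length : Nat) : Int)) (some w) = seg := by
      rw [← hidx, hfc, hdec]
      have : (pre.length : Int) + (seg.length : Int)
          = ((pre.length : Nat) : Int) + ((seg.length : Nat) : Int) := rfl
      rw [this, PySem.List.slice_natCast_add]
      simp
    have h4 : (pre.length : Int) + ((seg.length : Nat) : Int) = w := hidx
    have hseg := loadA_seg n seg hfree (s :: rest) (pre.length : Int) ((pre.length : Int) - 1)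
    rw [h3, h4] at hseg
    have hwl := loadA_wall n s rest w
      ((pre.length : Int) - 1 + ((seg.count "O" : Nat) : Int))
      (fun h => hwall (Or.inl h)) (fun h => hwall (Or.inr h))
    rw [hdec]
    simp only [stepB, h3, hslice, PySem.List.foldl_add, hseg, hwl,
      show (fun j : Int => n - j) = HSub.hSub n from rfl]
    omega

def colOf (map : List (List String)) (column_num : Int) : List String :=
  map.map (fun row => PySem.List.pyGetD row column_num "")

theorem mcn_eq_loadA (map : List (List String)) (column_num : Int) :
    move_column_north map column_num
      = loadA (map.length : Int) (colOf map column_num) 0 (-1) := by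
  have hdef : move_column_north map column_num
      = ((PySem.List.pyRange 0 ((map.length : Nat) : Int) 1).foldl
          (stepA map column_num ((map.length : Nat) : Int)) ([], -1, 0)).2.2 := rfl
  rw [hdef]
  have hlen : ((colOf map column_num).length : Int) = (map.length : Int) := by simp [colOf]
  have henum : PySem.List.enumerate (colOf map column_num) 0
      = (PySem.List.pyRange 0 ((colOf map column_num).length : Int) 1).map
          (fun j => (j, PySem.List.pyGetD (colOf map column_num) j "")) := by
    have := PySem.List.enumerate_eq_map_pyRange (colOf map column_num) ""
    simpa [PySem.List.len] using this
  have hstep : (PySem.List.pyRange 0 ((map.length : Nat) : Int) 1).foldl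
        (stepA map column_num ((map.length : Nat) : Int)) ([], -1, 0)
      = (PySem.List.enumerate (colOf map column_num) 0).foldl
          (stepE ((map.length : Nat) : Int)) ([], -1, 0) := by
    rw [henum, List.foldl_map, hlen]
    apply PySem.List.foldl_congr_mem
    intro st j hj
    have hj' : 0 ≤ j ∧ j < (map.length : Int) := (PySem.List.mem_pyRange_one).1 hj
    have hjlt : j.toNat < map.length := by omega
    have hjlt' : j.toNat < (colOf map column_num).length := by simp [colOf]; omega
    have hget : PySem.List.pyGetD map j [] = map[j.toNat]'hjlt :=
      PySem.List.pyGetD_eq_getElem map [] hj'.1 (by omega)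
    have hcget : PySem.List.pyGetD (colOf map column_num) j "" = (colOf map column_num)[j.toNat]'hjlt' :=
      PySem.List.pyGetD_eq_getElem (colOf map column_num) "" hj'.1 (by simp [colOf]; omega)
    have hcv : (colOf map column_num)[j.toNat]'hjlt'
        = PySem.List.pyGetD (map[j.toNat]'hjlt) column_num "" := by
      simp [colOf]
    simp only [stepA, stepE, hget, hcget, hcv]
  rw [hstep, foldE_eq]
  omega

theorem mcn_alt_eq_loadA (map : List (List String)) (column_num : Int) :
    move_column_north_alt map column_num
      = loadA (map.length : Int) (colOf map column_num) 0 (-1) := by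
  have hdef : move_column_north_alt map column_num
      = (((-1 : Int) :: ((((PySem.List.enumerate (colOf map column_num) 0).filter
              (fun p => !(p.2 == ".") && !(p.2 == "O"))).map (fun p => p.1)) ++ [((map.length : Nat) : Int)])).zip
          (PySem.List.slice ((-1 : Int) :: ((((PySem.List.enumerate (colOf map column_num) 0).filter
              (fun p => !(p.2 == ".") && !(p.2 == "O"))).map (fun p => p.1)) ++ [((map.length : Nat) : Int)]))
            (some 1) none)).foldl (stepB (colOf map column_num) ((map.length : Nat) : Int)) 0 := rfl
  rw [hdef, walls_enum (colOf map column_num) 0, PySem.List.slice_from_one, List.tail_cons]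
  have h := bfold_eq (colOf map column_num) (map.length : Int) (wallsOf (colOf map column_num) 0)
    [] (colOf map column_num) 0 (by simp) (by simp [colOf]) (by norm_num)
  simp only [List.length_nil, Nat.cast_zero] at h
  rw [show ((0 : Int) - 1) = (-1 : Int) from by omega] at h
  rw [h]
  omega

-- ===== VERDICT (by name: the statement is the Claim_ definition above) =====
theorem move_column_north_spec : Claim_equal_move_column_north := by
  intro map column_num _ _
  unfold Spec_move_column_north
  rw [mcn_eq_loadA, mcn_alt_eq_loadA]
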